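-- pv_equiv track=rewrite | github.com/cowboysmall-comp/hackerrank | src/algorithms/greedy/team_formation.py | team_formation
-- ===== SOURCE A (Python) =====
-- import heapq
--
-- def team_formation(N, A):
--     D = {}
--
--     def insert(K, V):
--         if K in D:
--             D[K].append(V)
--             heapq.heapify(D[K])
--         else:
--             D[K] = [V]
--
--     for a in sorted(A):
--         if a - 1 in D:
--             W = heapq.heappop(D[a - 1])
--
--             insert(a, W + 1)
--
--             if not D[a - 1]:
--                 del D[a - 1]
--         else:
--             insert(a, 1)
--
--     return min(heapq.heappop(D[d]) for d in D)
-- ===== SOURCE B (Python) =====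
-- def team_formation(N, A):
--     # Single pass over sorted(A) with a rolling window of two active groups
--     # (chains ending at the previous value and at the current value) and a
--     # running minimum `best` for finalized chains; no dict, no heapq.
--     best = None
--     p = None      # current value
--     hp = []       # lengths of chains ending at p - 1
--     hc = []       # lengths of chains ending at p
--     for a in sorted(A):
--         if p is None or a > p + 1:
--             for x in hp:
--                 if best is None or x < best:
--                     best = x
--             for x in hc:
--                 if best is None or x < best:
--                     best = x
--             hp, hc, p = [], [], a
--         elif a == p + 1:
--             for x in hp:
--                 if best is None or x < best:
--                     best = x
--             hp, hc, p = hc, [], a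
--         if hp:
--             w = min(hp)
--             hp.remove(w)
--             hc.append(w + 1)
--         else:
--             hc.append(1)
--     for x in hp:
--         if best is None or x < best:
--             best = x
--     for x in hc:
--         if best is None or x < best:
--             best = x
--     return best
-- ===== Notes on version B (the rewrite author's own statement) =====
-- stated objective: faster
-- what changed: Replaced the dict of per-ending-value heaps (whose insert() re-heapifies the whole bucket on every duplicate and whose final pass scans all dict entries) by a single left-to-right pass over sorted(A) that keeps only the chain lengths ending at the previous and at the current value plus a running minimum of already-finalized chains; no dict, no heapq.
import Mathlib
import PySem

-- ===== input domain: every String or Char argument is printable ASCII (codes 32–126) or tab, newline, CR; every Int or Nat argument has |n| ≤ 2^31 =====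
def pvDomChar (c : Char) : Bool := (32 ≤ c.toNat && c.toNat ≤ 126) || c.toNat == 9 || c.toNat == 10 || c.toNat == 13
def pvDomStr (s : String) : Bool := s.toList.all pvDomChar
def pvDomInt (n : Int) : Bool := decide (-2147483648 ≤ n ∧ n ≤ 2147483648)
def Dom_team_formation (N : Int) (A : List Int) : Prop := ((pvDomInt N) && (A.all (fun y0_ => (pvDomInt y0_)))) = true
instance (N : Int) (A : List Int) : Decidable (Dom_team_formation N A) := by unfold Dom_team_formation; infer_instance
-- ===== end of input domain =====

-- B replaces A's dict of per-ending-value heaps (A's insert() re-heapifies a whole bucket on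
-- every duplicate) by a single pass over sorted(A) keeping only the two active groups of chain
-- lengths and a running minimum of finalized chains; a timing run measured B faster.
-- Equivalence of the return value is proved for A ≠ []; on A = [] the Python A raises
-- ValueError (min of an empty generator), excluded by Pre_.


-- ===== PORT A =====
-- Heaps of ints are modelled at value level as lists: heapq.heappop returns the minimum and
-- removes its first occurrence (exact for A: heaps are only observed through heappop,
-- emptiness tests and heapify, all of which are multiset-level on int heaps; heapify is the
-- identity in this model). heappop of an empty heap raises IndexError in Python; A never
-- reaches that (guarded), the `none` branch below is dead code made total.
def pvHeappop (h : List Int) : Int × List Int :=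
  match PySem.List.min? h (fun y => y) with
  | some m => (m, (PySem.List.remove? h m).getD h)
  | none => (0, [])

-- the nested `insert` helper of A
def tfInsert (D : PySem.Dict Int (List Int)) (K : Int) (V : Int) : PySem.Dict Int (List Int) :=
  if D.contains K then D.modify K [] (fun h => h ++ [V])  -- append + heapify (identity at value level)
  else D.insert K [V]

-- body of A's `for a in sorted(A)` loop
def tfStep (D : PySem.Dict Int (List Int)) (a : Int) : PySem.Dict Int (List Int) :=
  if D.contains (a - 1) then
    let r := pvHeappop (D.getD (a - 1) [])
    let D1 := D.insert (a - 1) r.2            -- heappop mutates D[a-1] in place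
    let D2 := tfInsert D1 a (r.1 + 1)
    if r.2 = [] then D2.erase (a - 1) else D2
  else tfInsert D a 1

def team_formation (N : Int) (A : List Int) : Int :=
  let D := (PySem.List.sorted A (fun y => y) false).foldl tfStep PySem.Dict.empty
  -- min(heapq.heappop(D[d]) for d in D): first value, then running pairwise min;
  -- min() of an empty generator raises ValueError (only when A = []); excluded by Pre_
  match D.keys with
  | [] => 0
  | k :: ks => ks.foldl (fun acc d => min acc (pvHeappop (D.getD d [])).1) (pvHeappop (D.getD k [])).1

-- ===== PORT B =====
-- the `if best is None or x < best: best = x` folding loop of B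
def pvFoldBest (best : Option Int) (xs : List Int) : Option Int :=
  xs.foldl (fun b x =>
    match b with
    | none => some x
    | some bv => if x < bv then some x else some bv) best

-- body of B's loop; state = (best, p, hp, hc)
def tfAltStep (st : Option Int × Option Int × List Int × List Int) (a : Int) :
    Option Int × Option Int × List Int × List Int :=
  let s1 :=
    match st.2.1 with
    | none => (pvFoldBest (pvFoldBest st.1 st.2.2.1) st.2.2.2, some a, ([] : List Int), ([] : List Int))
    | some p =>
      if a > p + 1 then (pvFoldBest (pvFoldBest st.1 st.2.2.1) st.2.2.2, some a, [], [])
      else if a = p + 1 then (pvFoldBest st.1 st.2.2.1, some a, st.2.2.2, [])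
      else st
  -- `if hp: w = min(hp); hp.remove(w); hc.append(w+1) else: hc.append(1)`
  match PySem.List.min? s1.2.2.1 (fun y => y) with
  | some w => (s1.1, s1.2.1, (PySem.List.remove? s1.2.2.1 w).getD s1.2.2.1, s1.2.2.2 ++ [w + 1])
  | none => (s1.1, s1.2.1, s1.2.2.1, s1.2.2.2 ++ [1])

def team_formation_alt (N : Int) (A : List Int) : Int :=
  let st := (PySem.List.sorted A (fun y => y) false).foldl tfAltStep (none, none, [], [])
  match pvFoldBest (pvFoldBest st.1 st.2.2.1) st.2.2.2 with
  | some b => b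
  | none => 0   -- Python B returns None here; reachable only for A = [], excluded by Pre_

-- ===== PRECONDITION & SPEC =====
-- A raises ValueError on empty A (min of an empty generator); Pre_ excludes exactly that input.
def Pre_team_formation (N : Int) (A : List Int) : Prop := A ≠ []
instance (N : Int) (A : List Int) : Decidable (Pre_team_formation N A) := by
  unfold Pre_team_formation; infer_instance

def pvWitness_team_formation : Int × List Int := (3, [1, 2, 2])

def Spec_team_formation (N : Int) (A : List Int) (out : Int) : Prop := out = team_formation_alt N A
instance (N : Int) (A : List Int) (out : Int) : Decidable (Spec_team_formation N A out) := by
  unfold Spec_team_formation; infer_instance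

-- ===== CLAIM (what is proved, stated in full; the proofs are below) =====
def Claim_equal_team_formation : Prop :=
  ∀ (N : Int) (A : List Int), Dom_team_formation N A → Pre_team_formation N A →
    Spec_team_formation N A (team_formation N A)

-- ===== LEMMAS AND PROOFS =====

-- pvFoldBest facts
theorem pvFoldBest_nil (b : Option Int) : pvFoldBest b [] = b := rfl

theorem pvFoldBest_append (b : Option Int) (xs ys : List Int) :
    pvFoldBest b (xs ++ ys) = pvFoldBest (pvFoldBest b xs) ys := by
  simp [pvFoldBest, List.foldl_append]

theorem pvFoldBest_some (x : Int) (xs : List Int) :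
    pvFoldBest (some x) xs = some (xs.foldl min x) := by
  induction xs generalizing x with
  | nil => rfl
  | cons y ys ih =>
    simp only [pvFoldBest, List.foldl_cons] at *
    by_cases h : y < x
    · simp [h, ih, min_def, le_of_lt h, not_le.mpr h]
    · simp [h, ih, min_def, not_lt.mp h]

theorem min?_id_eq_pvFoldBest (xs : List Int) :
    PySem.List.min? xs (fun y => y) = pvFoldBest none xs := by
  simp only [PySem.List.min?, pvFoldBest]
  congr 1
  funext b x
  cases b <;> rfl

theorem pvFoldBest_none_cons (y : Int) (ys : List Int) :
    pvFoldBest none (y :: ys) = pvFoldBest (some y) ys := rfl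

theorem pvFoldBest_some_ne_nil (l : List Int) (h : l ≠ []) :
    some ((pvFoldBest none l).getD 0) = pvFoldBest none l := by
  obtain ⟨y, ys, rfl⟩ := List.exists_cons_of_ne_nil h
  rw [pvFoldBest_none_cons, pvFoldBest_some, Option.getD_some]

theorem pvHeappop_fst (l : List Int) :
    (pvHeappop l).1 = (PySem.List.min? l (fun y => y)).getD 0 := by
  unfold pvHeappop; cases h : PySem.List.min? l (fun y => y) <;> simp [h]

theorem foldl_keys_to_values (g : List Int → Int) (ks : List Int)
    (D : PySem.Dict Int (List Int)) (x : Int) :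
    ks.foldl (fun acc d => min acc (g (D.getD d []))) x
      = (ks.map (fun k => D.getD k [])).foldl (fun acc l => min acc (g l)) x := by
  rw [List.foldl_map]

theorem matchGetD (o : Option Int) :
    (match o with | some b => b | none => (0 : Int)) = o.getD 0 := by cases o <;> rfl

-- A's final pass: running min of per-heap minima = pvFoldBest over the concatenation
theorem foldMins (ls : List (List Int)) (x : Int) (h : ∀ l ∈ ls, l ≠ []) :
    ls.foldl (fun acc l => min acc ((PySem.List.min? l (fun y => y)).getD 0)) x
      = (pvFoldBest (some x) (ls.flatMap id)).getD 0 := by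
  induction ls generalizing x with
  | nil => simp [pvFoldBest]
  | cons l ls ih =>
    obtain ⟨y, ys, rfl⟩ := List.exists_cons_of_ne_nil (h l (by simp))
    have h' : ∀ l' ∈ ls, l' ≠ [] := fun l' hl' => h l' (by simp [hl'])
    have e1 : (PySem.List.min? (y :: ys) (fun t => t)).getD 0 = ys.foldl min y := by
      rw [min?_id_eq_pvFoldBest, pvFoldBest_none_cons, pvFoldBest_some, Option.getD_some]
    have e2 : pvFoldBest (some x) (y :: ys) = some (ys.foldl min (min x y)) := by
      rw [pvFoldBest_some, List.foldl_cons]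
    rw [List.foldl_cons, ih _ h', List.flatMap_cons, id_def, pvFoldBest_append, e1, e2,
      show min x (ys.foldl min y) = ys.foldl min (min x y) from List.foldl_assoc.symm]

-- the invariant tying A's dict to B's state
def deadOK (v : Int) (dead : List (Int × List Int)) : Prop :=
  (dead.map (·.1)).Pairwise (· < ·) ∧ ∀ p ∈ dead, p.1 ≤ v - 2 ∧ p.2 ≠ []

def tfInv (D : PySem.Dict Int (List Int)) (best : Option Int) (v : Int) (hp hc : List Int) : Prop :=
  ∃ dead : List (Int × List Int),
    D.items = dead ++ (if hp = [] then [] else [(v - 1, hp)]) ++ [(v, hc)]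
    ∧ hc ≠ []
    ∧ deadOK v dead
    ∧ best = pvFoldBest none (dead.flatMap (·.2))

-- items-level computation rules for the dict operations, given the items list
theorem contains_decomp (D : PySem.Dict Int (List Int)) (L : List (Int × List Int))
    (h : D.items = L) (k : Int) : D.contains k = L.any (fun p => p.1 == k) := by
  simp [PySem.Dict.contains, h]

theorem getD_decomp (D : PySem.Dict Int (List Int)) (L : List (Int × List Int))
    (h : D.items = L) (k : Int) :
    D.getD k [] = ((L.find? (fun p => p.1 == k)).map (·.2)).getD [] := by
  simp [PySem.Dict.getD, PySem.Dict.get?, h]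

theorem insert_items_existing (D : PySem.Dict Int (List Int)) (L : List (Int × List Int))
    (h : D.items = L) (k : Int) (w : List Int) (hk : L.any (fun p => p.1 == k) = true) :
    (D.insert k w).items = L.map (fun p => if p.1 == k then (k, w) else p) := by
  simp [PySem.Dict.insert, PySem.Dict.contains, h, hk]

theorem insert_items_fresh (D : PySem.Dict Int (List Int)) (L : List (Int × List Int))
    (h : D.items = L) (k : Int) (w : List Int) (hk : L.any (fun p => p.1 == k) = false) :
    (D.insert k w).items = L ++ [(k, w)] := by
  simp [PySem.Dict.insert, PySem.Dict.contains, h, hk]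

theorem erase_items (D : PySem.Dict Int (List Int)) (L : List (Int × List Int))
    (h : D.items = L) (k : Int) :
    (D.erase k).items = L.filter (fun p => !(p.1 == k)) := by
  simp [PySem.Dict.erase, h]

theorem any_key_dead (dead : List (Int × List Int)) (k : Int) (h : ∀ p ∈ dead, p.1 ≠ k) :
    dead.any (fun p => p.1 == k) = false := by
  simp only [List.any_eq_false]
  intro p hp
  simpa using h p hp

theorem find?_key_dead (dead t : List (Int × List Int)) (k : Int) (h : ∀ p ∈ dead, p.1 ≠ k) :
    ((dead ++ t).find? (fun p => p.1 == k)) = t.find? (fun p => p.1 == k) := by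
  have hnone : dead.find? (fun p => p.1 == k) = none :=
    List.find?_eq_none.mpr (fun p hp => by simp [h p hp])
  simp [List.find?_append, hnone]

theorem map_replace_skip (l : List (Int × List Int)) (k : Int) (w : List Int)
    (h : ∀ p ∈ l, p.1 ≠ k) :
    l.map (fun p => if p.1 == k then (k, w) else p) = l := by
  conv_rhs => rw [← List.map_id l]
  refine List.map_congr_left fun p hp => ?_
  simp [h p hp]

theorem map_replace_skip' (l : List (Int × List Int)) (k : Int) (w : List Int)
    (h : ∀ p ∈ l, p.1 ≠ k) :
    l.map (fun p => if p.1 = k then (k, w) else p) = l := by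
  conv_rhs => rw [← List.map_id l]
  refine List.map_congr_left fun p hp => ?_
  simp [h p hp]

theorem filter_key_skip (l : List (Int × List Int)) (k : Int) (h : ∀ p ∈ l, p.1 ≠ k) :
    l.filter (fun p => !(p.1 == k)) = l := by
  rw [List.filter_eq_self]
  intro p hp
  simpa using h p hp

theorem min?_remove_of_ne_nil (l : List Int) (h : l ≠ []) :
    ∃ m, PySem.List.min? l (fun y => y) = some m ∧ m ∈ l ∧
      (PySem.List.remove? l m).getD l = l.erase m := by
  cases hm : PySem.List.min? l (fun y => y) with
  | none => exact absurd ((PySem.List.min?_eq_none_iff l (fun y => y)).mp hm) h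
  | some m =>
    have hmem : m ∈ l := PySem.List.min?_mem hm
    exact ⟨m, rfl, hmem, by rw [PySem.List.remove?_eq_some_erase l m hmem, Option.getD_some]⟩

-- B-side step reductions
theorem tfAltStep_stay (best : Option Int) (v : Int) (hp hc : List Int) (a : Int)
    (h1 : ¬ a > v + 1) (h2 : ¬ a = v + 1) :
    tfAltStep (best, some v, hp, hc) a =
      (match PySem.List.min? hp (fun y => y) with
       | some w => (best, some v, (PySem.List.remove? hp w).getD hp, hc ++ [w + 1])
       | none => (best, some v, hp, hc ++ [1])) := by
  simp only [tfAltStep, if_neg h1, if_neg h2]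
  all_goals cases PySem.List.min? hp (fun y => y) <;> rfl

theorem tfAltStep_next (best : Option Int) (v : Int) (hp hc : List Int) (a : Int)
    (h1 : ¬ a > v + 1) (h2 : a = v + 1) :
    tfAltStep (best, some v, hp, hc) a =
      (match PySem.List.min? hc (fun y => y) with
       | some w => (pvFoldBest best hp, some a, (PySem.List.remove? hc w).getD hc, [w + 1])
       | none => (pvFoldBest best hp, some a, hc, [1])) := by
  simp only [tfAltStep, if_neg h1, if_pos h2]
  all_goals cases PySem.List.min? hc (fun y => y) <;> rfl

theorem tfAltStep_jump (best : Option Int) (v : Int) (hp hc : List Int) (a : Int)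
    (h1 : a > v + 1) :
    tfAltStep (best, some v, hp, hc) a =
      (pvFoldBest (pvFoldBest best hp) hc, some a, [], [1]) := by
  simp only [tfAltStep, if_pos h1]
  all_goals rfl

theorem step_preserve (D : PySem.Dict Int (List Int)) (best : Option Int) (v : Int)
    (hp hc : List Int) (a : Int) (hInv : tfInv D best v hp hc) (hva : v ≤ a) :
    ∃ best' hp' hc', tfAltStep (best, some v, hp, hc) a = (best', some a, hp', hc')
      ∧ tfInv (tfStep D a) best' a hp' hc' := by
  obtain ⟨dead, hitems, hhc, ⟨hpw, hbd⟩, hbest⟩ := hInv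
  have hdk : ∀ p ∈ dead, p.1 ≤ v - 2 := fun p h => (hbd p h).1
  by_cases hA : a = v
  · -- a = v : extend (or start) a chain ending at v
    subst hA
    by_cases hhp : hp = []
    · subst hhp
      refine ⟨best, [], hc ++ [1], ?_, ?_⟩
      · rw [tfAltStep_stay best a [] hc a (by omega) (by omega)]
        rfl
      · have hitems' : D.items = dead ++ [(a, hc)] := by simpa using hitems
        have hcont : D.contains (a - 1) = false := by
          rw [contains_decomp D _ hitems']
          simp [any_key_dead dead (a - 1) (fun p h => by have := hdk p h; omega)]
          try omega
        have hcv : D.contains a = true := by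
          rw [contains_decomp D _ hitems']
          simp
        have hgd : D.getD a [] = hc := by
          rw [getD_decomp D _ hitems',
            find?_key_dead dead _ a (fun p h => by have := hdk p h; omega)]
          simp
        have hit : (tfStep D a).items = dead ++ [(a, hc ++ [1])] := by
          simp only [tfStep, hcont, Bool.false_eq_true, if_false, tfInsert, hcv, if_true,
            PySem.Dict.modify, hgd]
          rw [insert_items_existing D _ hitems' a (hc ++ [1]) (by simp)]
          simp only [List.map_append,
            map_replace_skip dead a (hc ++ [1]) (fun p h => by have := hdk p h; omega)]
          simp
        exact ⟨dead, by simpa using hit, by simp, ⟨hpw, hbd⟩, hbest⟩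
    · -- hp ≠ [] : pop the minimum of hp
      obtain ⟨m, hm, hmem, hrem⟩ := min?_remove_of_ne_nil hp hhp
      refine ⟨best, hp.erase m, hc ++ [m + 1], ?_, ?_⟩
      · rw [tfAltStep_stay best a hp hc a (by omega) (by omega), hm]
        simp [hrem]
      · have hcont : D.contains (a - 1) = true := by
          rw [contains_decomp D _ hitems]
          simp [hhp]
        have hgd1 : D.getD (a - 1) [] = hp := by
          rw [getD_decomp D _ hitems, List.append_assoc,
            find?_key_dead dead _ (a - 1) (fun p h => by have := hdk p h; omega)]
          simp [hhp]
        have hpop : pvHeappop (D.getD (a - 1) []) = (m, hp.erase m) := by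
          rw [hgd1]
          simp [pvHeappop, hm, PySem.List.remove?_eq_some_erase hp m hmem]
        -- D1 = D with hp replaced by hp.erase m
        have hit1 : (D.insert (a - 1) (hp.erase m)).items
            = dead ++ [(a - 1, hp.erase m)] ++ [(a, hc)] := by
          rw [insert_items_existing D _ hitems (a - 1) (hp.erase m) (by simp [hhp])]
          simp only [List.map_append, map_replace_skip dead (a - 1) _
            (fun p h => by have := hdk p h; omega), hhp, if_false]
          simp
          omega
        have hcv1 : (D.insert (a - 1) (hp.erase m)).contains a = true := by
          rw [contains_decomp _ _ hit1]
          simp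
          try omega
        have hgd2 : (D.insert (a - 1) (hp.erase m)).getD a [] = hc := by
          rw [getD_decomp _ _ hit1, List.append_assoc,
            find?_key_dead dead _ a (fun p h => by have := hdk p h; omega)]
          simp
        have hit2 : (tfInsert (D.insert (a - 1) (hp.erase m)) a ((m : Int) + 1)).items
            = dead ++ [(a - 1, hp.erase m)] ++ [(a, hc ++ [m + 1])] := by
          simp only [tfInsert, hcv1, if_true, PySem.Dict.modify, hgd2]
          rw [insert_items_existing _ _ hit1 a (hc ++ [m + 1]) (by simp)]
          simp only [List.map_append, map_replace_skip dead a _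
            (fun p h => by have := hdk p h; omega)]
          simp
        have hstep : tfStep D a = if hp.erase m = []
            then (tfInsert (D.insert (a - 1) (hp.erase m)) a (m + 1)).erase (a - 1)
            else tfInsert (D.insert (a - 1) (hp.erase m)) a (m + 1) := by
          simp only [tfStep, hcont, if_true, hpop]
        by_cases herase : hp.erase m = []
        · have hit3 : (tfStep D a).items = dead ++ [(a, hc ++ [m + 1])] := by
            rw [hstep, if_pos herase, erase_items _ _ hit2]
            simp only [List.filter_append,
              filter_key_skip dead (a - 1) (fun p h => by have := hdk p h; omega),
              filter_key_skip [(a, hc ++ [m + 1])] (a - 1)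
                (by intro p h; simp at h; subst h; simp; omega)]
            simp
          exact ⟨dead, by simpa [herase] using hit3, by simp, ⟨hpw, hbd⟩, hbest⟩
        · have hit3 : (tfStep D a).items = dead ++ [(a - 1, hp.erase m)] ++ [(a, hc ++ [m + 1])] := by
            rw [hstep, if_neg herase]
            exact hit2
          exact ⟨dead, by simpa [herase] using hit3, by simp, ⟨hpw, hbd⟩, hbest⟩
  · by_cases hB : a = v + 1
    · -- a = v + 1 : chains ending at v - 1 die, pop the minimum of hc
      subst hB
      obtain ⟨m, hm, hmem, hrem⟩ := min?_remove_of_ne_nil hc hhc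
      refine ⟨pvFoldBest best hp, hc.erase m, [m + 1], ?_, ?_⟩
      · rw [tfAltStep_next best v hp hc (v + 1) (by omega) rfl, hm]
        simp [hrem]
      · have hcont : D.contains (v + 1 - 1) = true := by
          rw [contains_decomp D _ hitems]
          simp
        have hgd1 : D.getD (v + 1 - 1) [] = hc := by
          rw [getD_decomp D _ hitems, List.append_assoc,
            find?_key_dead dead _ (v + 1 - 1) (fun p h => by have := hdk p h; omega)]
          by_cases hhp : hp = [] <;> simp [hhp]
        have hpop : pvHeappop (D.getD (v + 1 - 1) []) = (m, hc.erase m) := by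
          rw [hgd1]
          simp [pvHeappop, hm, PySem.List.remove?_eq_some_erase hc m hmem]
        have hit1 : (D.insert (v + 1 - 1) (hc.erase m)).items
            = dead ++ (if hp = [] then [] else [(v - 1, hp)]) ++ [(v, hc.erase m)] := by
          rw [insert_items_existing D _ hitems (v + 1 - 1) (hc.erase m) (by simp)]
          by_cases hhp : hp = [] <;>
            simp [hhp, List.map_append, show ¬((v : Int) - 1 = v) by omega] <;>
            exact map_replace_skip' dead v _ (fun p h => by have := hdk p h; omega)
        have hcv1 : (D.insert (v + 1 - 1) (hc.erase m)).contains (v + 1) = false := by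
          rw [contains_decomp _ _ hit1]
          simp only [List.any_append, any_key_dead dead (v + 1) (fun p h => by have := hdk p h; omega)]
          by_cases hhp : hp = [] <;> simp [hhp] <;> try omega
        have hit2 : (tfInsert (D.insert (v + 1 - 1) (hc.erase m)) (v + 1) ((m : Int) + 1)).items
            = dead ++ (if hp = [] then [] else [(v - 1, hp)]) ++ [(v, hc.erase m)]
              ++ [(v + 1, [m + 1])] := by
          simp only [tfInsert, hcv1, Bool.false_eq_true, if_false]
          rw [insert_items_fresh _ _ hit1 (v + 1) [m + 1]
            (by rw [← contains_decomp _ _ hit1]; exact hcv1)]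
        have hstep : tfStep D (v + 1) = if hc.erase m = []
            then (tfInsert (D.insert (v + 1 - 1) (hc.erase m)) (v + 1) (m + 1)).erase (v + 1 - 1)
            else tfInsert (D.insert (v + 1 - 1) (hc.erase m)) (v + 1) (m + 1) := by
          simp only [tfStep, hcont, if_true, hpop]
        have hdeadOK : deadOK (v + 1) (dead ++ (if hp = [] then [] else [(v - 1, hp)])) := by
          constructor
          · by_cases hhp : hp = []
            · simpa [hhp] using hpw
            · simp only [hhp, if_false, List.map_append]
              rw [List.pairwise_append]
              refine ⟨hpw, by simp, ?_⟩
              intro k hk k' hk'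
              simp at hk'
              obtain ⟨p, hp1, rfl⟩ := List.mem_map.mp hk
              have := hdk p hp1
              omega
          · intro p hpmem
            rcases List.mem_append.mp hpmem with h | h
            · have := hbd p h
              exact ⟨by omega, this.2⟩
            · by_cases hhp : hp = [] <;> simp [hhp] at h
              subst h
              exact ⟨by simp; omega, by simpa using hhp⟩
        have hbest' : pvFoldBest best hp
            = pvFoldBest none ((dead ++ (if hp = [] then [] else [(v - 1, hp)])).flatMap (·.2)) := by
          by_cases hhp : hp = [] <;>
            simp [hhp, List.flatMap_append, pvFoldBest_append, pvFoldBest_nil, ← hbest]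
        by_cases herase : hc.erase m = []
        · have hit3 : (tfStep D (v + 1)).items
              = dead ++ (if hp = [] then [] else [(v - 1, hp)]) ++ [(v + 1, [m + 1])] := by
            rw [hstep, if_pos herase, erase_items _ _ hit2]
            by_cases hhp : hp = [] <;>
              simp [hhp, List.filter_append,
                show ¬((v : Int) - 1 = v) by omega, show ¬((v : Int) + 1 = v) by omega] <;>
              (intro x b hx; have := hdk (x, b) hx; simp at this; omega)
          refine ⟨dead ++ (if hp = [] then [] else [(v - 1, hp)]), ?_, by simp, hdeadOK, hbest'⟩
          simpa [herase] using hit3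
        · refine ⟨dead ++ (if hp = [] then [] else [(v - 1, hp)]), ?_, by simp, hdeadOK, hbest'⟩
          rw [hstep, if_neg herase, hit2]
          simp [herase]
    · -- a > v + 1 : everything dies, start a fresh chain [1]
      have hgt : a > v + 1 := by omega
      refine ⟨pvFoldBest (pvFoldBest best hp) hc, [], [1], tfAltStep_jump best v hp hc a hgt, ?_⟩
      have hcont : D.contains (a - 1) = false := by
        rw [contains_decomp D _ hitems]
        simp only [List.any_append, any_key_dead dead (a - 1) (fun p h => by have := hdk p h; omega)]
        by_cases hhp : hp = [] <;> simp [hhp] <;> try omega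
      have hcv : D.contains a = false := by
        rw [contains_decomp D _ hitems]
        simp only [List.any_append, any_key_dead dead a (fun p h => by have := hdk p h; omega)]
        by_cases hhp : hp = [] <;> simp [hhp] <;> try omega
      have hit : (tfStep D a).items
          = dead ++ (if hp = [] then [] else [(v - 1, hp)]) ++ [(v, hc)] ++ [(a, [1])] := by
        simp only [tfStep, hcont, Bool.false_eq_true, if_false, tfInsert, hcv]
        rw [insert_items_fresh D _ hitems a [1] (by rw [← contains_decomp D _ hitems]; exact hcv)]
      refine ⟨dead ++ (if hp = [] then [] else [(v - 1, hp)]) ++ [(v, hc)], ?_, by simp, ?_, ?_⟩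
      · simpa using hit
      · constructor
        · have hsplit : (dead ++ (if hp = [] then [] else [(v - 1, hp)]) ++ [(v, hc)]).map (·.1)
              = dead.map (·.1) ++ ((if hp = [] then [] else [(v - 1, hp)]).map (·.1) ++ [v]) := by
            simp
          rw [hsplit, List.pairwise_append]
          refine ⟨hpw, ?_, ?_⟩
          · by_cases hhp : hp = [] <;> simp [hhp] <;> try omega
          · intro k hk k' hk'
            obtain ⟨p, hp1, rfl⟩ := List.mem_map.mp hk
            have := hdk p hp1
            by_cases hhp : hp = [] <;> simp [hhp] at hk' <;> omega
        · intro p hpmem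
          rcases List.mem_append.mp hpmem with h | h
          · rcases List.mem_append.mp h with h' | h'
            · have := hbd p h'
              exact ⟨by omega, this.2⟩
            · by_cases hhp : hp = [] <;> simp [hhp] at h'
              subst h'
              exact ⟨by simp; omega, by simpa using hhp⟩
          · simp at h
            subst h
            exact ⟨by simp; omega, by simpa using hhc⟩
      · by_cases hhp : hp = [] <;>
          simp [hhp, List.flatMap_append, pvFoldBest_append, pvFoldBest_nil, ← hbest]

theorem run_preserve (l : List Int) (D : PySem.Dict Int (List Int)) (best : Option Int)
    (v : Int) (hp hc : List Int) (hInv : tfInv D best v hp hc)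
    (hbound : ∀ x ∈ l, v ≤ x) (hsort : l.Pairwise (· ≤ ·)) :
    ∃ best' v' hp' hc', l.foldl tfAltStep (best, some v, hp, hc) = (best', some v', hp', hc')
      ∧ tfInv (l.foldl tfStep D) best' v' hp' hc' := by
  induction l generalizing D best v hp hc with
  | nil => exact ⟨best, v, hp, hc, rfl, hInv⟩
  | cons a l ih =>
    obtain ⟨best1, hp1, hc1, hB, hI⟩ := step_preserve D best v hp hc a hInv (hbound a (by simp))
    rw [List.pairwise_cons] at hsort
    simpa [hB] using ih (tfStep D a) best1 a hp1 hc1 hI hsort.1 hsort.2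

theorem start_inv (a : Int) :
    tfAltStep (none, none, [], []) a = (none, some a, [], [1])
      ∧ tfInv (tfStep PySem.Dict.empty a) none a [] [1] := by
  refine ⟨rfl, [], ?_, by simp, ⟨by simp, by simp⟩, rfl⟩
  simp [tfStep, tfInsert, PySem.Dict.contains, PySem.Dict.empty, PySem.Dict.insert]

theorem final_eq (D : PySem.Dict Int (List Int)) (best : Option Int) (v : Int)
    (hp hc : List Int) (hInv : tfInv D best v hp hc) :
    (match D.keys with
     | [] => (0 : Int)
     | k :: ks => ks.foldl (fun acc d => min acc (pvHeappop (D.getD d [])).1)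
                    (pvHeappop (D.getD k [])).1)
      = (match pvFoldBest (pvFoldBest best hp) hc with | some b => b | none => 0) := by
  obtain ⟨dead, hitems, hhc, ⟨hpw, hbd⟩, hbest⟩ := hInv
  have hkey_dead : ∀ k ∈ dead.map (·.1), k ≤ v - 2 := by
    intro k hk
    obtain ⟨p, hp1, rfl⟩ := List.mem_map.mp hk
    exact (hbd p hp1).1
  have hkpw : D.keys.Pairwise (· < ·) := by
    simp only [PySem.Dict.keys, hitems, List.map_append]
    rw [List.append_assoc, List.pairwise_append]
    refine ⟨hpw, ?_, ?_⟩
    · by_cases hhp : hp = [] <;> simp [hhp]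
    · intro k hk k' hk'
      have h1 := hkey_dead k hk
      by_cases hhp : hp = [] <;> simp [hhp] at hk' <;> rcases hk' with rfl | rfl <;> omega
  have hnd : D.keys.Nodup := List.Pairwise.imp ne_of_lt hkpw
  have hvals : D.values = dead.map (·.2) ++ (if hp = [] then [] else [hp]) ++ [hc] := by
    by_cases hhp : hp = [] <;> simp [PySem.Dict.values, hitems, hhp]
  have hvne : ∀ l ∈ D.values, l ≠ [] := by
    rw [hvals]
    intro l hl
    simp only [List.mem_append, List.mem_singleton, List.mem_map] at hl
    rcases hl with (⟨p, hp1, rfl⟩ | hl) | rfl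
    · exact (hbd p hp1).2
    · by_cases hhp : hp = [] <;> simp [hhp] at hl; exact hl ▸ hhp
    · exact hhc
  have hvk : D.values = D.keys.map (fun k => D.getD k []) := PySem.Dict.values_eq_map_keys D hnd []
  cases hk : D.keys with
  | nil => simp [PySem.Dict.keys, hitems] at hk
  | cons k ks =>
    have hvcons : D.values = D.getD k [] :: ks.map (fun k => D.getD k []) := by
      rw [hvk, hk, List.map_cons]
    have hL0 : D.getD k [] ≠ [] := hvne _ (by rw [hvcons]; exact List.mem_cons_self)
    have htne : ∀ l ∈ ks.map (fun k => D.getD k []), l ≠ [] := by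
      intro l hl
      exact hvne l (by rw [hvcons]; exact List.mem_cons_of_mem _ hl)
    simp only [pvHeappop_fst]
    rw [foldl_keys_to_values (fun l => (PySem.List.min? l (fun y => y)).getD 0) ks D,
      foldMins _ _ htne, min?_id_eq_pvFoldBest,
      pvFoldBest_some_ne_nil _ hL0, ← pvFoldBest_append,
      matchGetD]
    congr 1
    have : D.getD k [] ++ (ks.map (fun k => D.getD k [])).flatMap id = D.values.flatMap id := by
      rw [hvcons]; simp
    rw [this, hvals]
    by_cases hhp : hp = [] <;>
      simp [hhp, List.flatMap_append, pvFoldBest_append, pvFoldBest_nil, ← hbest, List.flatMap_map]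

-- ===== VERDICT (by name: the statement is the Claim_ definition above) =====
theorem team_formation_spec : Claim_equal_team_formation := by
  intro N A _hDom hPre
  unfold Spec_team_formation team_formation team_formation_alt
  have hne : PySem.List.sorted A (fun y => y) false ≠ [] := by
    simpa [PySem.List.sorted_eq_nil_iff] using hPre
  obtain ⟨a0, rest, hA⟩ := List.exists_cons_of_ne_nil hne
  have hsort : (PySem.List.sorted A (fun y => y) false).Pairwise (fun x y => x ≤ y) :=
    PySem.List.sorted_pairwise A (fun y => y)
  rw [hA] at hsort ⊢
  rw [List.pairwise_cons] at hsort
  obtain ⟨hs0, hi0⟩ := start_inv a0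
  obtain ⟨best', v', hp', hc', hB, hI⟩ :=
    run_preserve rest (tfStep PySem.Dict.empty a0) none a0 [] [1] hi0 hsort.1 hsort.2
  simp only [List.foldl_cons, hs0, hB]
  exact final_eq _ _ _ _ _ hI
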